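-- pv_equiv track=rewrite | github.com/skazik/QT | handle_controller_serial_commander/src/path_finder.py | find_repeated_node
-- ===== SOURCE A (Python) =====
-- def find_repeated_node(processed_entries):
--     node_visit_count = {}
--
--     for entry in processed_entries:
--         current_node_name = entry.get("Postcondition", "")
--
--         # Increase the visit count for the current node
--         if current_node_name:
--             node_visit_count[current_node_name] = (
--                 node_visit_count.get(current_node_name, 0) + 1
--             )
--
--     # Find the first node that was visited more than once
--     for node_name, count in node_visit_count.items():
--         if count > 1:
--             return node_name  # Return the first repeated node
--
--     return ""  # Return an empty string if no repeated node is found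
-- ===== SOURCE B (Python) =====
-- def find_repeated_node(processed_entries):
--     seen = set()
--     dups = set()
--     for entry in processed_entries:
--         name = entry.get("Postcondition", "")
--         if name:
--             if name in seen:
--                 dups.add(name)
--             else:
--                 seen.add(name)
--     for entry in processed_entries:
--         name = entry.get("Postcondition", "")
--         if name and name in dups:
--             return name
--     return ""
-- ===== Notes on version B (the rewrite author's own statement) =====
-- stated objective: alternative
-- what changed: Replaces the count-dict building pass plus a scan over the dict's items with a seen/dups two-set pass followed by a second scan over the original input list that returns the first entry whose non-empty Postcondition is a duplicate.
import Mathlib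
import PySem

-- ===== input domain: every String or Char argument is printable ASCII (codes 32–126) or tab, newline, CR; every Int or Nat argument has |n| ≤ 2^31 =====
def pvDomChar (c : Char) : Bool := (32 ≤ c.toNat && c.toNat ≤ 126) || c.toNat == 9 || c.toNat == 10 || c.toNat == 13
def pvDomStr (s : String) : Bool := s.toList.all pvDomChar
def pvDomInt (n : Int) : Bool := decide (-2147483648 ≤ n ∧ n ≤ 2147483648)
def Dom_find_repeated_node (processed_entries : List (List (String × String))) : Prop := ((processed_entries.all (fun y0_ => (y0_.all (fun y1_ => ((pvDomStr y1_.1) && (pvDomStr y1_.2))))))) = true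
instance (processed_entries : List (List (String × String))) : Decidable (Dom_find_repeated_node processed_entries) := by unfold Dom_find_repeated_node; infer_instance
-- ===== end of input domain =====

-- B replaces A's count-dict + dict-items scan by a seen/dups two-set pass plus a second scan
-- over the original input list (alternative decomposition, same asymptotic cost).


-- ===== PORT A =====
-- entry.get("Postcondition", "") : first-match lookup in the association list
def pvPostA (entry : List (String × String)) : String :=
  (PySem.Dict.mk entry).getD "Postcondition" ""

-- A's second loop: 'for node_name, count in …items(): if count > 1: return node_name' / fall through to ""
def pvFirstRepeated : List (String × Int) → String
  | [] => ""
  | (node_name, count) :: rest => if 1 < count then node_name else pvFirstRepeated rest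

def find_repeated_node (processed_entries : List (List (String × String))) : String :=
  -- first loop: build node_visit_count
  let node_visit_count : PySem.Dict String Int :=
    processed_entries.foldl (fun d entry =>
      let current_node_name := pvPostA entry
      if current_node_name ≠ "" then
        d.insert current_node_name (d.getD current_node_name 0 + 1)
      else d) PySem.Dict.empty
  pvFirstRepeated node_visit_count.items

-- ===== PORT B =====
def pvPostB (entry : List (String × String)) : String :=
  (PySem.Dict.mk entry).getD "Postcondition" ""

-- B's second pass: 'for entry in …: if name and name in dups: return name' / fall through to ""
def pvFirstDup (dups : PySem.Set String) : List (List (String × String)) → String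
  | [] => ""
  | entry :: rest =>
      let name := pvPostB entry
      if decide (name ≠ "") && PySem.Set.contains dups name then name else pvFirstDup dups rest

def find_repeated_node_alt (processed_entries : List (List (String × String))) : String :=
  -- first pass: seen / dups sets
  let sd : PySem.Set String × PySem.Set String :=
    processed_entries.foldl (fun sd entry =>
      let name := pvPostB entry
      if name ≠ "" then
        if PySem.Set.contains sd.1 name then (sd.1, PySem.Set.add sd.2 name)
        else (PySem.Set.add sd.1 name, sd.2)
      else sd) (PySem.Set.empty, PySem.Set.empty)
  pvFirstDup sd.2 processed_entries

-- ===== PRECONDITION & SPEC =====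
def Spec_find_repeated_node (processed_entries : List (List (String × String))) (out : String) : Prop := out = find_repeated_node_alt processed_entries
instance (processed_entries : List (List (String × String))) (out : String) : Decidable (Spec_find_repeated_node processed_entries out) := by unfold Spec_find_repeated_node; infer_instance

-- ===== CLAIM (what is proved, stated in full; the proofs are below) =====
def Claim_equal_find_repeated_node : Prop := ∀ (processed_entries : List (List (String × String))), Dom_find_repeated_node processed_entries → Spec_find_repeated_node processed_entries (find_repeated_node processed_entries)

-- ===== LEMMAS AND PROOFS =====

-- a fold whose body acts only on the non-empty name of each entry is a fold over the
-- filtered name list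
theorem foldl_guard {α β : Type} (f : β → String) (g : α → String → α)
    (l : List β) (init : α) :
    l.foldl (fun a e => if f e ≠ "" then g a (f e) else a) init
      = ((l.map f).filter (fun s => decide (s ≠ ""))).foldl g init := by
  induction l generalizing init with
  | nil => rfl
  | cons e t ih =>
    by_cases h : f e = ""
    · simpa [h] using ih init
    · simpa [h] using ih (g init (f e))

-- find? over the deduplicated list is find? over the list itself
theorem find?_ofList {α : Type} [BEq α] [LawfulBEq α] (p : α → Bool) (xs : List α) :
    (PySem.Set.ofList xs).find? p = xs.find? p := by
  induction xs with
  | nil => rfl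
  | cons x t ih =>
    rw [PySem.Set.ofList_cons]
    by_cases h : p x = true
    · simp [h]
    · have h' : p x = false := by simpa using h
      simp only [List.find?_cons, h']
      rw [← ih]
      -- removing an element not satisfying p does not change find?
      have : ∀ (s : List α), (PySem.Set.discard s x).find? p = s.find? p := by
        intro s
        induction s with
        | nil => rfl
        | cons y u ihs =>
          by_cases hyx : y = x
          · subst hyx; simp [PySem.Set.discard, h']
            simpa [PySem.Set.discard] using ihs
          · by_cases hp : p y = true <;>
              simp [PySem.Set.discard, hp, hyx, beq_eq_false_iff_ne] at ihs ⊢ <;>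
              simpa [PySem.Set.discard] using ihs
      exact this _

-- the B-side step on the name list
def pvStep (sd : PySem.Set String × PySem.Set String) (n : String) :
    PySem.Set String × PySem.Set String :=
  if PySem.Set.contains sd.1 n then (sd.1, PySem.Set.add sd.2 n)
  else (PySem.Set.add sd.1 n, sd.2)

-- invariant of B's first pass: membership in the dups component
theorem pvStep_foldl_snd_mem (l : List String) (s d : PySem.Set String) (x : String) :
    x ∈ (l.foldl pvStep (s, d)).2 ↔ x ∈ d ∨ (x ∈ s ∧ x ∈ l) ∨ 2 ≤ l.count x := by
  induction l generalizing s d with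
  | nil => simp
  | cons n t ih =>
    simp only [List.foldl_cons]
    by_cases hn : PySem.Set.contains s n = true
    · have hns : n ∈ s := (PySem.Set.contains_iff s n).1 hn
      rw [pvStep, if_pos hn, ih]
      by_cases hx : x = n
      · subst hx
        simp only [PySem.Set.mem_add, List.mem_cons]
        constructor
        · rintro ((h | h) | h | h)
          · exact Or.inl h
          · exact Or.inr (Or.inl ⟨hns, Or.inl trivial⟩)
          · exact Or.inr (Or.inl ⟨h.1, Or.inr h.2⟩)
          · exact Or.inr (Or.inr (by rw [List.count_cons_self]; omega))
        · rintro (h | _ | _)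
          · exact Or.inl (Or.inl h)
          · exact Or.inl (Or.inr trivial)
          · exact Or.inl (Or.inr trivial)
      · have hxn : x ≠ n := hx
        simp [PySem.Set.mem_add, hx, List.count_cons_of_ne (Ne.symm hxn)]
    · have hns : n ∉ s := fun hm => hn ((PySem.Set.contains_iff s n).2 hm)
      rw [pvStep, if_neg hn, ih]
      by_cases hx : x = n
      · subst hx
        simp only [PySem.Set.mem_add, List.mem_cons, List.count_cons_self]
        constructor
        · rintro (h | ⟨_, ht⟩ | h)
          · exact Or.inl h
          · exact Or.inr (Or.inr (by have := List.one_le_count_iff.2 ht; omega))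
          · exact Or.inr (Or.inr (by omega))
        · rintro (h | ⟨hxs, _⟩ | h)
          · exact Or.inl h
          · exact absurd hxs hns
          · have ht : x ∈ t := List.one_le_count_iff.1 (by omega)
            exact Or.inr (Or.inl ⟨Or.inr trivial, ht⟩)
      · have hxn : x ≠ n := hx
        simp [PySem.Set.mem_add, hx, List.count_cons_of_ne (Ne.symm hxn)]

-- the non-empty Postcondition names, in entry order
def pvNames (pes : List (List (String × String))) : List String :=
  (pes.map pvPostA).filter (fun s => decide (s ≠ ""))

-- the common canonical value: first name (in entry order) occurring at least twice
def pvCanon (pes : List (List (String × String))) : String :=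
  match (pvNames pes).find? (fun n => decide (2 ≤ (pvNames pes).count n)) with
  | some n => n
  | none => ""

theorem A_fold (pes : List (List (String × String))) :
    (pes.foldl (fun d entry =>
        if pvPostA entry ≠ "" then d.insert (pvPostA entry) (d.getD (pvPostA entry) 0 + 1) else d)
        PySem.Dict.empty)
      = PySem.Dict.counter (pvNames pes) := by
  rw [← PySem.Dict.foldl_insert_getD_add_one_eq_counter, pvNames]
  exact foldl_guard pvPostA
    (fun (d : PySem.Dict String Int) n => d.insert n (d.getD n 0 + 1)) pes _

theorem B_fold (pes : List (List (String × String))) :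
    (pes.foldl (fun sd entry =>
        if pvPostB entry ≠ "" then
          (if PySem.Set.contains sd.1 (pvPostB entry) then (sd.1, PySem.Set.add sd.2 (pvPostB entry))
           else (PySem.Set.add sd.1 (pvPostB entry), sd.2))
        else sd) (PySem.Set.empty, PySem.Set.empty))
      = (pvNames pes).foldl pvStep (PySem.Set.empty, PySem.Set.empty) := by
  rw [pvNames]
  exact foldl_guard pvPostB pvStep pes _

theorem dups_contains (pes : List (List (String × String))) (m : String) :
    PySem.Set.contains ((pvNames pes).foldl pvStep (PySem.Set.empty, PySem.Set.empty)).2 m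
      = decide (2 ≤ (pvNames pes).count m) := by
  have h := pvStep_foldl_snd_mem (pvNames pes) PySem.Set.empty PySem.Set.empty m
  simp only [PySem.Set.empty, List.not_mem_nil, false_and, false_or] at h
  by_cases hc : 2 ≤ (pvNames pes).count m
  · simp only [hc, decide_true]
    exact (PySem.Set.contains_iff _ _).2 (h.mpr hc)
  · simp only [hc, decide_false]
    rw [Bool.eq_false_iff]
    intro hct
    exact hc (h.mp ((PySem.Set.contains_iff _ _).1 hct))

-- scanning a list of (key, count) pairs for the first count > 1 is find?
theorem pvFirstRepeated_eq_find? (l : List (String × Int)) :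
    pvFirstRepeated l
      = (match l.find? (fun p => decide (1 < p.2)) with
         | some p => p.1
         | none => "") := by
  induction l with
  | nil => rfl
  | cons p t ih =>
    obtain ⟨k, c⟩ := p
    by_cases h : (1 : Int) < c
    · simp [pvFirstRepeated, h]
    · simp [pvFirstRepeated, h, ih]

-- B's second pass is find? over the entries
theorem pvFirstDup_eq_find? (dups : PySem.Set String) (l : List (List (String × String))) :
    pvFirstDup dups l
      = (match l.find? (fun e => decide (pvPostB e ≠ "") && PySem.Set.contains dups (pvPostB e)) with
         | some e => pvPostB e
         | none => "") := by
  induction l with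
  | nil => rfl
  | cons e t ih =>
    have hshow : pvFirstDup dups (e :: t)
        = (if (decide (pvPostB e ≠ "") && PySem.Set.contains dups (pvPostB e)) = true
           then pvPostB e else pvFirstDup dups t) := rfl
    by_cases h : (decide (pvPostB e ≠ "") && PySem.Set.contains dups (pvPostB e)) = true
    · rw [hshow, if_pos h, List.find?_cons_of_pos (p := fun e => decide (pvPostB e ≠ "") && PySem.Set.contains dups (pvPostB e)) h]
    · rw [hshow, if_neg h, List.find?_cons_of_neg (p := fun e => decide (pvPostB e ≠ "") && PySem.Set.contains dups (pvPostB e)) h, ih]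

theorem find?_names_to_entries (pes : List (List (String × String))) (p : String → Bool) :
    (pvNames pes).find? p
      = (pes.find? (fun e => decide (pvPostA e ≠ "") && p (pvPostA e))).map pvPostA := by
  rw [pvNames, List.find?_filter, List.find?_map]
  have hpred : ((fun a => decide (decide (a ≠ "") = true ∧ p a = true)) ∘ pvPostA)
      = fun e => decide (pvPostA e ≠ "") && p (pvPostA e) := by
    funext e
    by_cases h : pvPostA e = "" <;> simp [Function.comp, h]
  rw [hpred]

theorem A_canon (pes : List (List (String × String))) :
    find_repeated_node pes = pvCanon pes := by
  have h0 : find_repeated_node pes =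
      pvFirstRepeated ((pes.foldl (fun d entry =>
          if pvPostA entry ≠ "" then d.insert (pvPostA entry) (d.getD (pvPostA entry) 0 + 1) else d)
          PySem.Dict.empty).items) := rfl
  rw [h0, A_fold, pvFirstRepeated_eq_find?, PySem.Dict.items_counter, List.find?_map]
  have hpred : ((fun p : String × Int => decide (1 < p.2)) ∘
        (fun k => (k, ((pvNames pes).count k : Int))))
      = fun n => decide (2 ≤ (pvNames pes).count n) := by
    funext n
    show decide ((1 : Int) < ((pvNames pes).count n : Int)) = decide (2 ≤ (pvNames pes).count n)
    rw [decide_eq_decide]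
    omega
  rw [hpred, find?_ofList, pvCanon]
  cases (pvNames pes).find? (fun n => decide (2 ≤ (pvNames pes).count n)) <;> rfl

theorem B_canon (pes : List (List (String × String))) :
    find_repeated_node_alt pes = pvCanon pes := by
  have h0 : find_repeated_node_alt pes =
      pvFirstDup (pes.foldl (fun sd entry =>
          if pvPostB entry ≠ "" then
            (if PySem.Set.contains sd.1 (pvPostB entry) then (sd.1, PySem.Set.add sd.2 (pvPostB entry))
             else (PySem.Set.add sd.1 (pvPostB entry), sd.2))
          else sd) (PySem.Set.empty, PySem.Set.empty)).2 pes := rfl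
  rw [h0, B_fold, pvFirstDup_eq_find?]
  have hpred : (fun e => decide (pvPostB e ≠ "") &&
        PySem.Set.contains ((pvNames pes).foldl pvStep (PySem.Set.empty, PySem.Set.empty)).2 (pvPostB e))
      = fun e => decide (pvPostA e ≠ "") && decide (2 ≤ (pvNames pes).count (pvPostA e)) := by
    funext e
    rw [dups_contains]
    rfl
  rw [hpred, pvCanon, find?_names_to_entries]
  cases pes.find? (fun e => decide (pvPostA e ≠ "") && decide (2 ≤ (pvNames pes).count (pvPostA e))) <;> rfl

-- ===== VERDICT (by name: the statement is the Claim_ definition above) =====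
theorem find_repeated_node_spec : Claim_equal_find_repeated_node := by
  intro pes _
  show find_repeated_node pes = find_repeated_node_alt pes
  rw [A_canon, B_canon]
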